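-- pv_equiv track=rewrite | github.com/s203237/Kalaha-AI-minimax | AI.py | _landing_index
-- ===== SOURCE A (Python) =====
-- def _landing_index(board, player_id, pit):
--     """Computes where the last seed lands for a candidate move."""
--     seeds = board[pit]
--     current = pit
--
--     while seeds > 0:
--         current = (current + 1) % 14
--         if player_id == 1 and current == 13:
--             continue
--         if player_id == 2 and current == 6:
--             continue
--         seeds -= 1
--
--     return current
-- ===== SOURCE B (Python) =====
-- def _landing_index(board, player_id, pit):
--     """O(1): map positions onto the 13-pit cycle (store of the opponent skipped) and add seeds modulo the cycle length."""
--     seeds = board[pit]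
--     if seeds <= 0:
--         return pit
--     p = pit % 14
--     if player_id == 1:
--         r = 12 if p == 13 else p          # position 13 behaves like 12 (next drop is pit 0)
--         return (r + seeds) % 13
--     if player_id == 2:
--         # rank within the cycle 0..5,7..13 ; starting at 6 behaves like rank 5
--         r = p if p < 6 else (5 if p == 6 else p - 1)
--         t = (r + seeds) % 13
--         return t if t < 6 else t + 1
--     return (pit + seeds) % 14
-- ===== Notes on version B (the rewrite author's own statement) =====
-- stated objective: alternative
-- what changed: B replaces A's seed-by-seed sowing loop (one iteration per seed, with continue on the skipped store) by a closed-form computation: the landing pit is the start position's rank in the 13-position cycle (opponent's store removed) plus the seed count, modulo 13 (modulo 14 when player_id is neither 1 nor 2), mapped back past the skipped store.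
import Mathlib
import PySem

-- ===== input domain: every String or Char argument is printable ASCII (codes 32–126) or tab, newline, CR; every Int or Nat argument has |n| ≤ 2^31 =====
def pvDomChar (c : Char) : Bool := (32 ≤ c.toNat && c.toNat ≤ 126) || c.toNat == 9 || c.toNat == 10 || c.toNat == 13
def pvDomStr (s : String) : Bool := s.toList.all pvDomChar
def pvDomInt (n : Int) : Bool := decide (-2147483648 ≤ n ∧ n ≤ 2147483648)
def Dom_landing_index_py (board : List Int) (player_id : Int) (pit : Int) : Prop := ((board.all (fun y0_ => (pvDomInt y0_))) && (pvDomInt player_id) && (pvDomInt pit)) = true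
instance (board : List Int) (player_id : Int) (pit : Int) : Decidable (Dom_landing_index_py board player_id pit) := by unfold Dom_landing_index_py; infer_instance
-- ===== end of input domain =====

-- B replaces A's seed-by-seed sowing loop by closed-form modular arithmetic over the 13-pit cycle (opponent's store skipped); return-value equivalence.

-- ===== PORT A =====
-- A's while loop, fuel = number of seeds still to sow; the `continue` branches
-- (skipping the opponent's store) are inlined into the step: a skip position can
-- never be hit twice in a row, so each seed advances once and possibly skips once.
def pvLoopA (player_id : Int) : Nat → Int → Int
  | 0, current => current
  | n + 1, current =>
    let c := PySem.Int.mod (current + 1) 14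
    if (player_id = 1 ∧ c = 13) ∨ (player_id = 2 ∧ c = 6) then
      pvLoopA player_id n (PySem.Int.mod (c + 1) 14)
    else
      pvLoopA player_id n c

def landing_index_py (board : List Int) (player_id : Int) (pit : Int) : Int :=
  match PySem.List.pyGet? board pit with
  | none => 0  -- IndexError in Python; excluded by Pre_
  | some seeds => pvLoopA player_id seeds.toNat pit

-- ===== PORT B =====
def landing_index_py_alt (board : List Int) (player_id : Int) (pit : Int) : Int :=
  match PySem.List.pyGet? board pit with
  | none => 0  -- IndexError in Python; excluded by Pre_
  | some seeds =>
    if seeds ≤ 0 then pit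
    else
      let p := PySem.Int.mod pit 14
      if player_id = 1 then
        let r := if p = 13 then 12 else p
        PySem.Int.mod (r + seeds) 13
      else if player_id = 2 then
        let r := if p < 6 then p else if p = 6 then 5 else p - 1
        let t := PySem.Int.mod (r + seeds) 13
        if t < 6 then t else t + 1
      else
        PySem.Int.mod (pit + seeds) 14

-- ===== PRECONDITION & SPEC =====
-- Pre_ excludes exactly the inputs where board[pit] raises IndexError.
def Pre_landing_index_py (board : List Int) (player_id : Int) (pit : Int) : Prop :=
  -(board.length : Int) ≤ pit ∧ pit < board.length
instance (board : List Int) (player_id : Int) (pit : Int) : Decidable (Pre_landing_index_py board player_id pit) := by unfold Pre_landing_index_py; infer_instance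
def pvWitness_landing_index_py : List Int × Int × Int := ([3, 0, 5, 1, 2, 0, 4], 1, 2)

def Spec_landing_index_py (board : List Int) (player_id : Int) (pit : Int) (out : Int) : Prop := out = landing_index_py_alt board player_id pit
instance (board : List Int) (player_id : Int) (pit : Int) (out : Int) : Decidable (Spec_landing_index_py board player_id pit out) := by unfold Spec_landing_index_py; infer_instance

-- ===== CLAIM (what is proved, stated in full; the proofs are below) =====
def Claim_equal_landing_index_py : Prop := ∀ (board : List Int) (player_id : Int) (pit : Int), Dom_landing_index_py board player_id pit → Pre_landing_index_py board player_id pit → Spec_landing_index_py board player_id pit (landing_index_py board player_id pit)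

-- ===== LEMMAS AND PROOFS =====

-- Python mod by the positive literals 14 and 13 is Lean's emod.
theorem pvmod14 (a : Int) : PySem.Int.mod a 14 = a % 14 :=
  PySem.Int.mod_eq_emod_of_pos (by norm_num)
theorem pvmod13 (a : Int) : PySem.Int.mod a 13 = a % 13 :=
  PySem.Int.mod_eq_emod_of_pos (by norm_num)

-- sowing n+1 seeds = sow one, then n
theorem pvLoopA_succ (pid : Int) (n : Nat) (c : Int) :
    pvLoopA pid (n + 1) c = pvLoopA pid n (pvLoopA pid 1 c) := by
  by_cases h : (pid = 1 ∧ PySem.Int.mod (c + 1) 14 = 13) ∨ (pid = 2 ∧ PySem.Int.mod (c + 1) 14 = 6)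
  · conv_lhs => rw [pvLoopA, if_pos h]
    conv_rhs => rw [show pvLoopA pid 1 c = PySem.Int.mod (PySem.Int.mod (c + 1) 14 + 1) 14 by
      rw [pvLoopA, if_pos h]; rfl]
  · conv_lhs => rw [pvLoopA, if_neg h]
    conv_rhs => rw [show pvLoopA pid 1 c = PySem.Int.mod (c + 1) 14 by
      rw [pvLoopA, if_neg h]; rfl]

-- one sowing step, player 1: ranks live in 0..12
theorem pvStep1 (c : Int) :
    pvLoopA 1 1 c = ((if c % 14 = 13 then 12 else c % 14) + 1) % 13 := by
  rw [pvLoopA]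
  simp only [pvmod14]
  have h := Int.emod_nonneg c (by norm_num : (14:Int) ≠ 0)
  have h' := Int.emod_lt_of_pos c (by norm_num : (0:Int) < 14)
  have e1 : (c + 1) % 14 = (c % 14 + 1) % 14 := by omega
  have h2 := Int.emod_nonneg (c % 14 + 1) (by norm_num : (14:Int) ≠ 0)
  have h2' := Int.emod_lt_of_pos (c % 14 + 1) (by norm_num : (0:Int) < 14)
  rw [e1]
  split_ifs with hc hb hb <;> simp only [pvLoopA] <;> (try norm_num at hc) <;> omega

theorem pvLoop1 (n : Nat) (c : Int) :
    pvLoopA 1 (n + 1) c = ((if c % 14 = 13 then 12 else c % 14) + (n + 1)) % 13 := by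
  induction n generalizing c with
  | zero => simpa using pvStep1 c
  | succ m ih =>
    rw [pvLoopA_succ, ih, pvStep1]
    have h := Int.emod_nonneg c (by norm_num : (14:Int) ≠ 0)
    have h' := Int.emod_lt_of_pos c (by norm_num : (0:Int) < 14)
    set r := (if c % 14 = 13 then 12 else c % 14) with hr
    have hrb : 0 ≤ r ∧ r ≤ 13 := by rw [hr]; split_ifs <;> omega
    have hs := Int.emod_nonneg (r + 1) (by norm_num : (13:Int) ≠ 0)
    have hs' := Int.emod_lt_of_pos (r + 1) (by norm_num : (0:Int) < 13)
    have e14 : ((r + 1) % 13) % 14 = (r + 1) % 13 := by omega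
    rw [e14]
    have e13 : (if (r + 1) % 13 = 13 then (12:Int) else (r + 1) % 13) = (r + 1) % 13 := by
      split_ifs <;> omega
    rw [e13]
    push_cast
    omega

-- one sowing step, player 2: lands in 0..5, 7..13; rank advances by one mod 13
theorem pvStep2 (c : Int) :
    pvLoopA 2 1 c =
      (let p := c % 14
       let r := if p < 6 then p else if p = 6 then 5 else p - 1
       let t := (r + 1) % 13
       if t < 6 then t else t + 1) := by
  rw [pvLoopA]
  simp only [pvmod14]
  have h := Int.emod_nonneg c (by norm_num : (14:Int) ≠ 0)
  have h' := Int.emod_lt_of_pos c (by norm_num : (0:Int) < 14)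
  have e1 : (c + 1) % 14 = (c % 14 + 1) % 14 := by omega
  have h2 := Int.emod_nonneg (c % 14 + 1) (by norm_num : (14:Int) ≠ 0)
  have h2' := Int.emod_lt_of_pos (c % 14 + 1) (by norm_num : (0:Int) < 14)
  rw [e1]
  split_ifs with hc <;> simp only [pvLoopA] <;> (try norm_num at hc) <;> omega

theorem pvLoop2 (n : Nat) (c : Int) :
    pvLoopA 2 (n + 1) c =
      (let p := c % 14
       let r := if p < 6 then p else if p = 6 then 5 else p - 1
       let t := (r + (n + 1)) % 13
       if t < 6 then t else t + 1) := by
  induction n generalizing c with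
  | zero => simpa using pvStep2 c
  | succ m ih =>
    rw [pvLoopA_succ, ih, pvStep2]
    simp only
    have h := Int.emod_nonneg c (by norm_num : (14:Int) ≠ 0)
    have h' := Int.emod_lt_of_pos c (by norm_num : (0:Int) < 14)
    set p := c % 14 with hp
    set r := (if p < 6 then p else if p = 6 then 5 else p - 1) with hr
    have hrb : 0 ≤ r ∧ r ≤ 12 := by rw [hr]; split_ifs <;> omega
    have hs := Int.emod_nonneg (r + 1) (by norm_num : (13:Int) ≠ 0)
    have hs' := Int.emod_lt_of_pos (r + 1) (by norm_num : (0:Int) < 13)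
    set t := (r + 1) % 13 with ht
    set v := (if t < 6 then t else t + 1) with hv
    have hv14 : v % 14 = v := by rw [hv]; split_ifs <;> omega
    have hvr : (if v % 14 < 6 then v % 14 else if v % 14 = 6 then (5:Int) else v % 14 - 1) = t := by
      rw [hv14, hv]; split_ifs <;> omega
    rw [hvr]
    have e : (t + (↑m + 1)) % 13 = (r + (↑(m + 1) + 1)) % 13 := by push_cast; omega
    rw [e]

-- generic player: never skips
theorem pvLoopG (player_id : Int) (h1 : player_id ≠ 1) (h2 : player_id ≠ 2)
    (n : Nat) (c : Int) :
    pvLoopA player_id (n + 1) c = (c + (n + 1)) % 14 := by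
  have hstep : ∀ d : Int, pvLoopA player_id 1 d = (d + 1) % 14 := by
    intro d
    rw [pvLoopA, if_neg (by tauto)]
    simp [pvLoopA]
  induction n generalizing c with
  | zero => simpa using hstep c
  | succ m ih =>
    rw [pvLoopA_succ, ih, hstep]
    push_cast
    omega

-- ===== VERDICT (by name: the statement is the Claim_ definition above) =====
theorem landing_index_py_spec : Claim_equal_landing_index_py := by
  intro board player_id pit _ hpre
  unfold Spec_landing_index_py landing_index_py landing_index_py_alt
  rcases hget : PySem.List.pyGet? board pit with _ | seeds
  · exact absurd ((PySem.List.pyGet?_eq_none_iff board pit).mp hget) (by exact fun hn => hn ⟨hpre.1, hpre.2⟩)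
  · simp only
    by_cases hs : seeds ≤ 0
    · have h0 : seeds.toNat = 0 := by omega
      rw [h0, if_pos hs]
      rfl
    · obtain ⟨n, hn⟩ : ∃ n : Nat, seeds.toNat = n + 1 := ⟨seeds.toNat - 1, by omega⟩
      have hseeds : (n : Int) + 1 = seeds := by omega
      rw [hn, if_neg hs]
      by_cases h1 : player_id = 1
      · subst h1
        rw [pvLoop1]
        simp only [pvmod14, pvmod13, hseeds]
        norm_num
      · by_cases h2 : player_id = 2
        · subst h2
          rw [pvLoop2]
          simp only [pvmod14, pvmod13, hseeds]
          norm_num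
        · rw [pvLoopG player_id h1 h2]
          simp only [pvmod14, if_neg h1, if_neg h2, hseeds]
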